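-- pv_equiv track=rewrite | github.com/kevinmartinezpallares-collab/kmfx-edge | kmfx_connector_api.py | _split_env_list
-- ===== SOURCE A (Python) =====
-- def _split_env_list(value: str) -> list[str]:
--     seen: set[str] = set()
--     items: list[str] = []
--     for raw_item in str(value or "").replace(";", ",").split(","):
--         item = raw_item.strip().rstrip("/")
--         if not item or item == "*" or item in seen:
--             continue
--         seen.add(item)
--         items.append(item)
--     return items
-- ===== SOURCE B (Python) =====
-- def _split_env_list(value: str) -> list[str]:
--     # single character-level scan: no replace/split/strip calls, no seen set;
--     # dedup by membership in the output list itself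
--     s = str(value or "")
--     items: list[str] = []
--     i, n = 0, len(s)
--     while i <= n:
--         j = i
--         while j < n and s[j] != "," and s[j] != ";":
--             j += 1
--         tok = s[i:j]
--         a, b = 0, len(tok)
--         while a < b and tok[a].isspace():
--             a += 1
--         while b > a and tok[b - 1].isspace():
--             b -= 1
--         while b > a and tok[b - 1] == "/":
--             b -= 1
--         item = tok[a:b]
--         if item and item != "*" and item not in items:
--             items.append(item)
--         i = j + 1
--     return items
-- ===== Notes on version B (the rewrite author's own statement) =====
-- stated objective: alternative
-- what changed: Replaces the replace+split+strip pipeline with seen-set dedup by a single hand-rolled character-level scanner: one index walk finds delimiter-free token spans, explicit index loops trim whitespace and trailing slashes, and duplicates are detected by membership in the output list itself (no auxiliary set).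
import Mathlib
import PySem

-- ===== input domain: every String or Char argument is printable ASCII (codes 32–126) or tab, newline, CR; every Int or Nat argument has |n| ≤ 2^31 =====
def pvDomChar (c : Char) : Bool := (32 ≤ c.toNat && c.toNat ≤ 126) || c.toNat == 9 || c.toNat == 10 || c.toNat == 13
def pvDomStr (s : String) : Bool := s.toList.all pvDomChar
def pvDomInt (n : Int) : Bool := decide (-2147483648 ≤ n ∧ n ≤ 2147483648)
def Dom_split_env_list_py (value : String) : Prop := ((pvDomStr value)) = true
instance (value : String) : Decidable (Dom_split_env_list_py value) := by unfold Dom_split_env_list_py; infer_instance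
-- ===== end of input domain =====

-- B change: A's replace/split/strip pipeline with a seen set becomes in B one hand-rolled
-- character-level scan (delimiter-free spans, explicit trimming of whitespace and trailing
-- slashes, dedup by membership in the output list itself) — alternative decomposition.

-- hand port of str.rstrip("/"): drop the trailing '/' characters (exact)
def pvRstripSlash (cs : List Char) : List Char := (cs.reverse.dropWhile (fun c => c == '/')).reverse

-- item = raw.strip().rstrip("/") — A's cleaning step
def pvClean (cs : List Char) : List Char := pvRstripSlash (PySem.Chars.strip cs)

-- the loop body of A: filter, dedup against the seen set, append
def pvStepA (st : PySem.Set (List Char) × List (List Char)) (raw : List Char) :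
    PySem.Set (List Char) × List (List Char) :=
  let item := pvClean raw
  if item == ([] : List Char) || item == ['*'] || PySem.Set.contains st.1 item then st
  else (PySem.Set.add st.1 item, st.2 ++ [item])

-- ===== PORT A =====
def split_env_list_py (value : String) : List String :=
  let base := if value = "" then "" else value   -- str(value or "")
  let toks := PySem.Chars.splitOn (PySem.Chars.replace base.toList [';'] [',']) [',']
  let res := toks.foldl pvStepA
    ((PySem.Set.empty : PySem.Set (List Char)), ([] : List (List Char)))
  res.2.map String.ofList

-- ===== PORT B =====
-- B's trimming index loops on the token span, ported as the corresponding dropWhile steps;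
-- tok[a].isspace() is PySem.Chars.strIsspace on the one-char string (exact)
def pvCleanB (tok : List Char) : List Char :=
  let t1 := tok.dropWhile (fun c => PySem.Chars.strIsspace [c])
  let t2 := (t1.reverse.dropWhile (fun c => PySem.Chars.strIsspace [c])).reverse
  (t2.reverse.dropWhile (fun c => c == '/')).reverse

-- B's per-token step: clean, then append unless empty / "*" / already in the output list
def pvEmit (items : List (List Char)) (tok : List Char) : List (List Char) :=
  let item := pvCleanB tok
  if !(item == ([] : List Char)) && !(item == ['*']) && !(items.contains item)
  then items ++ [item] else items

-- B's outer scan: walk the characters once, finalizing the current span at ',' or ';'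
def pvScanB : List Char → List Char → List (List Char) → List (List Char)
  | [], cur, items => pvEmit items cur.reverse
  | c :: rest, cur, items =>
    if c == ',' || c == ';' then pvScanB rest [] (pvEmit items cur.reverse)
    else pvScanB rest (c :: cur) items

def split_env_list_py_alt (value : String) : List String :=
  let base := if value = "" then "" else value   -- str(value or "")
  (pvScanB base.toList [] []).map String.ofList

-- ===== PRECONDITION & SPEC =====
def Spec_split_env_list_py (value : String) (out : List String) : Prop := out = split_env_list_py_alt value
instance (value : String) (out : List String) : Decidable (Spec_split_env_list_py value out) := by unfold Spec_split_env_list_py; infer_instance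

-- ===== CLAIM (what is proved, stated in full; the proofs are below) =====
def Claim_equal_split_env_list_py : Prop := ∀ (value : String), Dom_split_env_list_py value → Spec_split_env_list_py value (split_env_list_py value)

-- ===== LEMMAS AND PROOFS =====

-- proof-only helpers: a reference splitter and the head-prepend operation
def pvConsHead (p : List Char) : List (List Char) → List (List Char)
  | [] => [p]
  | t :: ts => (p ++ t) :: ts

def pvSplitC : List Char → List (List Char)
  | [] => [[]]
  | c :: rest => if c == ',' then [] :: pvSplitC rest else pvConsHead [c] (pvSplitC rest)

def pvSplit2 : List Char → List (List Char)
  | [] => [[]]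
  | c :: rest => if c == ',' || c == ';' then [] :: pvSplit2 rest else pvConsHead [c] (pvSplit2 rest)

def pvRepl (c : Char) : Char := if c == ';' then ',' else c

theorem pvConsHead_ne_nil (p : List Char) (ts : List (List Char)) : pvConsHead p ts ≠ [] := by
  cases ts <;> simp [pvConsHead]

theorem pvSplitC_ne_nil (cs : List Char) : pvSplitC cs ≠ [] := by
  cases cs with
  | nil => simp [pvSplitC]
  | cons c rest =>
    by_cases h : c == ','
    · simp [pvSplitC, h]
    · simp [pvSplitC, h, pvConsHead_ne_nil]

theorem pvSplit2_ne_nil (cs : List Char) : pvSplit2 cs ≠ [] := by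
  cases cs with
  | nil => simp [pvSplit2]
  | cons c rest =>
    by_cases h : (c == ',' || c == ';') = true
    · simp [pvSplit2, h]
    · simp [pvSplit2, h, pvConsHead_ne_nil]

theorem pvConsHead_nil (ts : List (List Char)) (h : ts ≠ []) : pvConsHead [] ts = ts := by
  cases ts with
  | nil => exact absurd rfl h
  | cons t ts' => simp [pvConsHead]

theorem pvConsHead_consHead (p q : List Char) (ts : List (List Char)) :
    pvConsHead p (pvConsHead q ts) = pvConsHead (p ++ q) ts := by
  cases ts <;> simp [pvConsHead]

-- replace.go with old = ";" and new = "," maps ';' to ','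
theorem pv_replace_go (l : List Char) : ∀ (fuel : Nat) (acc : List Char), l.length ≤ fuel →
    PySem.Chars.replace.go [';'] [','] fuel l acc = acc.reverse ++ l.map pvRepl := by
  induction l with
  | nil =>
    intro fuel acc _
    cases fuel <;> simp [PySem.Chars.replace.go]
  | cons c t ih =>
    intro fuel acc hf
    cases fuel with
    | zero => simp at hf
    | succ f =>
      by_cases h : c == ';'
      · have hc : c = ';' := by simpa using h
        rw [show PySem.Chars.replace.go [';'] [','] (f+1) (c :: t) acc
            = PySem.Chars.replace.go [';'] [','] f t (',' :: acc) from by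
          simp [PySem.Chars.replace.go, List.isPrefixOf, hc]]
        rw [ih f (',' :: acc) (by simpa using hf)]
        simp [pvRepl, hc]
      · have hc : ¬ c = ';' := by simpa using h
        have hc' : ¬ (';' = c) := fun h' => hc h'.symm
        rw [show PySem.Chars.replace.go [';'] [','] (f+1) (c :: t) acc
            = PySem.Chars.replace.go [';'] [','] f t (c :: acc) from by
          simp [PySem.Chars.replace.go, List.isPrefixOf, hc']]
        rw [ih f (c :: acc) (by simpa using hf)]
        simp [pvRepl, hc]

theorem pv_replace_eq (cs : List Char) :
    PySem.Chars.replace cs [';'] [','] = cs.map pvRepl := by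
  unfold PySem.Chars.replace
  simpa using pv_replace_go cs cs.length [] le_rfl

-- splitOn.go with sep = "," is the reference comma splitter
theorem pv_split_go (l : List Char) : ∀ (fuel : Nat) (cur : List Char) (acc : List (List Char)),
    l.length < fuel →
    PySem.Chars.splitOn.go [','] fuel l cur acc = acc.reverse ++ pvConsHead cur.reverse (pvSplitC l) := by
  induction l with
  | nil =>
    intro fuel cur acc hf
    cases fuel with
    | zero => simp at hf
    | succ f => simp [PySem.Chars.splitOn.go, pvSplitC, pvConsHead]
  | cons c t ih =>
    intro fuel cur acc hf
    cases fuel with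
    | zero => simp at hf
    | succ f =>
      by_cases h : c == ','
      · have hc : c = ',' := by simpa using h
        rw [show PySem.Chars.splitOn.go [','] (f+1) (c :: t) cur acc
            = PySem.Chars.splitOn.go [','] f t [] (cur.reverse :: acc) from by
          simp [PySem.Chars.splitOn.go, List.isPrefixOf, hc]]
        rw [ih f [] (cur.reverse :: acc) (by simpa using hf)]
        obtain ⟨hd, tl, hts⟩ := List.exists_cons_of_ne_nil (pvSplitC_ne_nil t)
        simp [pvSplitC, hc, hts, pvConsHead]
      · have hc : ¬ c = ',' := by simpa using h
        have hc' : ¬ (',' = c) := fun h' => hc h'.symm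
        rw [show PySem.Chars.splitOn.go [','] (f+1) (c :: t) cur acc
            = PySem.Chars.splitOn.go [','] f t (c :: cur) acc from by
          simp [PySem.Chars.splitOn.go, List.isPrefixOf, hc']]
        rw [ih f (c :: cur) acc (by simpa using hf)]
        simp [pvSplitC, hc, pvConsHead_consHead]

theorem pv_splitOn_eq (cs : List Char) :
    PySem.Chars.splitOn cs [','] = pvSplitC cs := by
  unfold PySem.Chars.splitOn
  rw [pv_split_go cs (cs.length + 1) [] [] (by omega)]
  simp [pvConsHead_nil _ (pvSplitC_ne_nil cs)]

-- splitting the replaced string on ',' = splitting the original on ',' or ';'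
theorem pv_splitC_map_repl (cs : List Char) : pvSplitC (cs.map pvRepl) = pvSplit2 cs := by
  induction cs with
  | nil => rfl
  | cons c rest ih =>
    by_cases h : (c == ',' || c == ';') = true
    · have : pvRepl c = ',' := by
        rcases (by simpa using h : c = ',' ∨ c = ';') with h' | h' <;> simp [pvRepl, h']
      simp [pvSplitC, pvSplit2, this, h, ih]
    · have h1 : ¬ c = ',' := by intro h'; simp [h'] at h
      have h2 : ¬ c = ';' := by intro h'; simp [h'] at h
      simp [pvSplitC, pvSplit2, pvRepl, h1, h2, ih]

-- B's cleaning equals A's cleaning: the one-char isspace test is Chars.isspace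
theorem pvConsHead_nil_split2 (cs : List Char) : pvConsHead [] (pvSplit2 cs) = pvSplit2 cs :=
  pvConsHead_nil _ (pvSplit2_ne_nil cs)

theorem pv_clean_eq : pvCleanB = pvClean := by
  funext t
  have hs : (fun c => PySem.Chars.strIsspace [c]) = PySem.Chars.isspace := by
    funext c; simp [PySem.Chars.strIsspace]
  simp [pvCleanB, pvClean, PySem.Chars.strip, PySem.Chars.lstrip, PySem.Chars.rstrip,
    pvRstripSlash, hs]

-- B's scan = fold of B's per-token step over the reference split
theorem pv_scan_eq (cs : List Char) : ∀ (cur : List Char) (items : List (List Char)),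
    pvScanB cs cur items = (pvConsHead cur.reverse (pvSplit2 cs)).foldl pvEmit items := by
  induction cs with
  | nil => intro cur items; simp [pvScanB, pvSplit2, pvConsHead]
  | cons c rest ih =>
    intro cur items
    by_cases h : (c == ',' || c == ';') = true
    · rw [show pvScanB (c :: rest) cur items = pvScanB rest [] (pvEmit items cur.reverse) from by
        simp [pvScanB, h]]
      rw [ih [] (pvEmit items cur.reverse)]
      simp only [List.reverse_nil, pvConsHead_nil _ (pvSplit2_ne_nil rest)]
      obtain ⟨t, ts, hts⟩ := List.exists_cons_of_ne_nil (pvSplit2_ne_nil rest)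
      simp [pvSplit2, h, hts, pvConsHead]
    · rw [show pvScanB (c :: rest) cur items = pvScanB rest (c :: cur) items from by
        simp [pvScanB, h]]
      rw [ih (c :: cur) items]
      simp [pvSplit2, h, pvConsHead_consHead]

-- folding B's step = folding Set.add over the cleaned-and-filtered tokens
theorem pv_emit_fold (toks : List (List Char)) : ∀ (items : List (List Char)),
    toks.foldl pvEmit items
    = ((toks.map pvCleanB).filter (fun t => !(t == ([] : List Char)) && !(t == ['*']))).foldl
        PySem.Set.add items := by
  induction toks with
  | nil => intro items; rfl
  | cons raw rest ih =>
    intro items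
    simp only [List.foldl_cons, List.map_cons, List.filter_cons]
    by_cases h0 : pvCleanB raw == ([] : List Char)
    · rw [show pvEmit items raw = items from by simp [pvEmit, h0]]
      simpa [h0] using ih items
    · by_cases h1 : pvCleanB raw == ['*']
      · rw [show pvEmit items raw = items from by simp [pvEmit, h1]]
        simpa [h0, h1] using ih items
      · by_cases h2 : pvCleanB raw ∈ items
        · rw [show pvEmit items raw = items from by simp [pvEmit, h2]]
          have : PySem.Set.add items (pvCleanB raw) = items := by simp [PySem.Set.add, h2]
          simpa [h0, h1, this] using ih items
        · rw [show pvEmit items raw = items ++ [pvCleanB raw] from by simp [pvEmit, h0, h1, h2]]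
          have : PySem.Set.add items (pvCleanB raw) = items ++ [pvCleanB raw] := by
            simp [PySem.Set.add, h2]
          simpa [h0, h1, this] using ih (items ++ [pvCleanB raw])

-- A's fold, started with the set equal to the item list, yields the Set.add-fold over the
-- cleaned-and-filtered tokens: filtered tokens are skipped, duplicate tokens are Set.add no-ops.
theorem pv_loop_eq (l : List (List Char)) (s : List (List Char)) :
    (l.foldl pvStepA (s, s)).2
    = ((l.map pvClean).filter (fun t => !(t == ([] : List Char)) && !(t == ['*']))).foldl
        PySem.Set.add s := by
  induction l generalizing s with
  | nil => rfl
  | cons raw rest ih =>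
    simp only [List.foldl_cons, List.map_cons, List.filter_cons]
    by_cases h0 : pvClean raw == ([] : List Char)
    · rw [show pvStepA (s, s) raw = (s, s) from by simp [pvStepA, h0]]
      simpa [h0] using ih s
    · by_cases h1 : pvClean raw == ['*']
      · rw [show pvStepA (s, s) raw = (s, s) from by simp [pvStepA, h1]]
        simpa [h0, h1] using ih s
      · by_cases h2 : pvClean raw ∈ s
        · rw [show pvStepA (s, s) raw = (s, s) from by simp [pvStepA, h2]]
          have : PySem.Set.add s (pvClean raw) = s := by simp [PySem.Set.add, h2]
          simpa [h0, h1, this] using ih s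
        · rw [show pvStepA (s, s) raw = (s ++ [pvClean raw], s ++ [pvClean raw]) from by
            simp [pvStepA, h0, h1, h2, PySem.Set.add]]
          have : PySem.Set.add s (pvClean raw) = s ++ [pvClean raw] := by
            simp [PySem.Set.add, h2]
          simpa [h0, h1, this] using ih (s ++ [pvClean raw])

-- ===== VERDICT (by name: the statement is the Claim_ definition above) =====
theorem split_env_list_py_spec : Claim_equal_split_env_list_py := by
  intro value _
  unfold Spec_split_env_list_py split_env_list_py split_env_list_py_alt
  simp only [pv_replace_eq, pv_splitOn_eq, pv_splitC_map_repl, pv_scan_eq, List.reverse_nil,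
    pvConsHead_nil_split2, pv_emit_fold, pv_clean_eq]
  rw [show (PySem.Set.empty : PySem.Set (List Char)) = ([] : List (List Char)) from rfl]
  rw [pv_loop_eq]
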